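-- pv_equiv track=rewrite | github.com/NiceOneSon/leetcode | 프로그래머스/lv2/60058. 괄호 변환/괄호 변환.py | solution
-- ===== SOURCE A (Python) =====
-- def balanced(p):
--     cnt = 0 #1 if p[0] == '(' else -1
--     correct = True if p[0] == '(' else False
--
--     for i in range(len(p)):
--         if p[i] == '(':
--             cnt += 1
--         else:
--             cnt -= 1
--
--         if cnt == 0:
--             return p[:i+1], p[i+1:], correct
--
--
--     return p, '', correct
--
-- def solution(p):
--     if p == '':
--         return ''
--
--     answer = ''
--     u, v, correct = balanced(p)
--
--     if correct:
--         answer += u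
--         answer += solution(v)
--     else:
--         tmp = '('
--         tmp += solution(v)
--         tmp += ')'
--         for string in u[1:-1]:
--             if string == '(':
--                 tmp += ')'
--             else:
--                 tmp += '('
--         answer = answer + tmp
--
--     return answer
-- ===== SOURCE B (Python) =====
-- def solution(p):
--     # One pass splits p into minimal balanced (or trailing unbalanced) segments,
--     # then a right-to-left fold assembles the answer iteratively.
--     segs = []
--     cur = []
--     cnt = 0
--     for ch in p:
--         cur.append(ch)
--         cnt += 1 if ch == '(' else -1
--         if cnt == 0:
--             segs.append(''.join(cur))
--             cur = []
--     if cur: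
--         segs.append(''.join(cur))
--     res = ''
--     for s in reversed(segs):
--         if s[0] == '(':
--             res = s + res
--         else:
--             res = '(' + res + ')' + ''.join(')' if c == '(' else '(' for c in s[1:-1])
--     return res
-- ===== Notes on version B (the rewrite author's own statement) =====
-- stated objective: alternative
-- what changed: Replaces A's per-segment recursion (re-calling solution on the remainder inside each branch) with a single left-to-right pass that splits p into minimal balanced segments plus trailing remainder, followed by an iterative right-to-left fold assembling the answer.
import Mathlib
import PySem

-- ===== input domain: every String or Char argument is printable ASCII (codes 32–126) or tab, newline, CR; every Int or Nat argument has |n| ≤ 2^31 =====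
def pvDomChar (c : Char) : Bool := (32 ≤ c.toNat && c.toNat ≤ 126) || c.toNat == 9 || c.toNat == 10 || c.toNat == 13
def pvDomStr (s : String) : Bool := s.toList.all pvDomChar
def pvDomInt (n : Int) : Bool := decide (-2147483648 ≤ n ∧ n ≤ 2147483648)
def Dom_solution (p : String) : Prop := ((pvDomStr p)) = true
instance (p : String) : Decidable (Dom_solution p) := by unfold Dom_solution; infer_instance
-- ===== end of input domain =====

-- B replaces A's recursion-per-segment with one segmentation pass plus an iterative
-- right-to-left fold over the segment list (objective: alternative decomposition).

-- ===== PORT A =====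

-- the `for i in range(len(p))` loop of `balanced`: returns the first index where cnt hits 0
def balLoopA (p : List Char) (i : Nat) (cnt : Int) : Option Nat :=
  if h : i < p.length then
    let cnt' := if p[i] = '(' then cnt + 1 else cnt - 1
    if cnt' = 0 then some i else balLoopA p (i + 1) cnt'
  else none
termination_by p.length - i

-- balanced(p): p[:i+1], p[i+1:], correct   (p[0] read via pyGet?; only called on nonempty p)
def balancedA (p : List Char) : List Char × List Char × Bool :=
  let correct := PySem.List.pyGet? p 0 == some '('
  match balLoopA p 0 0 with
  | some i => (PySem.List.slice p none (some ((i : Int) + 1)),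
               PySem.List.slice p (some ((i : Int) + 1)) none, correct)
  | none => (p, [], correct)

-- the `for string in u[1:-1]` loop appending flipped brackets to tmp
def flipLoopA : List Char → List Char
  | [] => []
  | c :: rest => (if c = '(' then ')' else '(') :: flipLoopA rest

theorem balancedA_snd_lt (p : List Char) (hp : p ≠ []) :
    (balancedA p).2.1.length < p.length := by
  unfold balancedA
  cases hfz : balLoopA p 0 0 with
  | none => simpa using List.length_pos_iff.mpr hp
  | some i =>
    have hcast : ((i : Int) + 1) = ((i + 1 : Nat) : Int) := by push_cast; ring
    simp only [hcast, PySem.List.slice_from_natCast, List.length_drop]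
    have := List.length_pos_iff.mpr hp
    omega

def solutionCoreA (p : List Char) : List Char :=
  if hp : p = [] then [] else
    let b := balancedA p
    if b.2.2 then b.1 ++ solutionCoreA b.2.1
    else '(' :: solutionCoreA b.2.1 ++ ')' :: flipLoopA (PySem.List.slice b.1 (some 1) (some (-1)))
termination_by p.length
decreasing_by all_goals exact balancedA_snd_lt p hp

def solution (p : String) : String := String.ofList (solutionCoreA p.toList)

-- ===== PORT B =====

-- the segmentation pass of Source B: cur accumulates the current segment, segs the finished ones
def segLoopB (rest cur : List Char) (cnt : Int) (segs : List (List Char)) : List (List Char) :=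
  match rest with
  | [] => if cur ≠ [] then segs ++ [cur] else segs
  | ch :: rest' =>
    let cur' := cur ++ [ch]
    let cnt' := if ch = '(' then cnt + 1 else cnt - 1
    if cnt' = 0 then segLoopB rest' [] cnt' (segs ++ [cur'])
    else segLoopB rest' cur' cnt' segs

-- ''.join(')' if c == '(' else '(' for c in s[1:-1])
def flipB (l : List Char) : List Char := l.map (fun c => if c = '(' then ')' else '(')

-- the `for s in reversed(segs)` fold of Source B
def foldStepB (res s : List Char) : List Char :=
  if PySem.List.pyGet? s 0 == some '(' then s ++ res
  else '(' :: res ++ ')' :: flipB (PySem.List.slice s (some 1) (some (-1)))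

def solution_alt (p : String) : String :=
  String.ofList ((segLoopB p.toList [] 0 []).reverse.foldl foldStepB [])

-- ===== PRECONDITION & SPEC =====
def Spec_solution (p : String) (out : String) : Prop := out = solution_alt p
instance (p : String) (out : String) : Decidable (Spec_solution p out) := by unfold Spec_solution; infer_instance

-- ===== CLAIM (what is proved, stated in full; the proofs are below) =====
def Claim_equal_solution : Prop := ∀ (p : String), Dom_solution p → Spec_solution p (solution p)

-- ===== LEMMAS AND PROOFS =====

-- first index (relative) at which the running count reaches 0; shared characterisation
def fz : List Char → Int → Option Nat
  | [], _ => none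
  | c :: rest, cnt =>
    let cnt' := if c = '(' then cnt + 1 else cnt - 1
    if cnt' = 0 then some 0 else (fz rest cnt').map (· + 1)

theorem fz_lt {p : List Char} {cnt : Int} {j : Nat} (h : fz p cnt = some j) : j < p.length := by
  induction p generalizing cnt j with
  | nil => simp [fz] at h
  | cons c rest ih =>
    simp only [fz] at h
    by_cases hz : (if c = '(' then cnt + 1 else cnt - 1) = 0
    · rw [if_pos hz] at h
      simp at h
      simp [← h]
    · rw [if_neg hz] at h
      rw [Option.map_eq_some_iff] at h
      obtain ⟨k, hk, hkj⟩ := h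
      have := ih hk
      simp [← hkj]; omega

theorem balLoopA_eq_fz (p : List Char) (i : Nat) (cnt : Int) (hi : i ≤ p.length) :
    balLoopA p i cnt = (fz (p.drop i) cnt).map (· + i) := by
  by_cases h : i < p.length
  · have hdrop : p.drop i = p[i] :: p.drop (i + 1) := List.drop_eq_getElem_cons h
    rw [balLoopA, dif_pos h, hdrop]
    simp only [fz]
    by_cases hz : (if p[i] = '(' then cnt + 1 else cnt - 1) = 0
    · rw [if_pos hz, if_pos hz]; simp
    · rw [if_neg hz, if_neg hz]
      rw [balLoopA_eq_fz p (i + 1) _ (by omega)]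
      cases fz (p.drop (i + 1)) (if p[i] = '(' then cnt + 1 else cnt - 1) with
      | none => simp
      | some k => simp; omega
  · have hd : p.drop i = [] := List.drop_eq_nil_of_le (by omega)
    rw [balLoopA, dif_neg h, hd]
    simp [fz]
termination_by p.length - i

theorem segLoopB_acc (rest cur : List Char) (cnt : Int) (segs : List (List Char)) :
    segLoopB rest cur cnt segs = segs ++ segLoopB rest cur cnt [] := by
  induction rest generalizing cur cnt segs with
  | nil => by_cases h : cur = [] <;> simp [segLoopB, h]
  | cons ch rest' ih =>
    simp only [segLoopB]
    by_cases hz : (if ch = '(' then cnt + 1 else cnt - 1) = 0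
    · rw [if_pos hz, if_pos hz, ih _ _ (segs ++ [cur ++ [ch]]), ih _ _ ([] ++ [cur ++ [ch]])]
      simp
    · rw [if_neg hz, if_neg hz]
      exact ih _ _ segs

theorem segLoopB_eq_fz (rest cur : List Char) (cnt : Int) :
    segLoopB rest cur cnt [] =
      match fz rest cnt with
      | some j => (cur ++ rest.take (j + 1)) :: segLoopB (rest.drop (j + 1)) [] 0 []
      | none => if cur ++ rest = [] then [] else [cur ++ rest] := by
  induction rest generalizing cur cnt with
  | nil =>
    simp only [fz, segLoopB]
    by_cases h : cur = [] <;> simp [h]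
  | cons ch rest' ih =>
    simp only [fz, segLoopB]
    by_cases hz : (if ch = '(' then cnt + 1 else cnt - 1) = 0
    · rw [if_pos hz, if_pos hz, segLoopB_acc]
      have : (if ch = '(' then cnt + 1 else cnt - 1) = 0 → segLoopB rest' [] (if ch = '(' then cnt + 1 else cnt - 1) [] = segLoopB rest' [] 0 [] := by
        intro h; rw [h]
      simp [this hz, List.take_succ_cons]
    · rw [if_neg hz, if_neg hz, ih]
      cases hr : fz rest' (if ch = '(' then cnt + 1 else cnt - 1) with
      | some j => simp [List.take_succ_cons]
      | none => simp

theorem head_take (p : List Char) (n : Nat) (hn : 0 < n) (hp : p ≠ []) :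
    PySem.List.pyGet? (p.take n) 0 = PySem.List.pyGet? p 0 := by
  cases p with
  | nil => simp at hp
  | cons c rest => cases n with
    | zero => omega
    | succ m => simp

theorem foldB_cons (s : List Char) (l : List (List Char)) :
    (s :: l).reverse.foldl foldStepB [] = foldStepB (l.reverse.foldl foldStepB []) s := by
  simp [List.foldl_append]

theorem flipLoopA_eq_flipB (l : List Char) : flipLoopA l = flipB l := by
  induction l with
  | nil => rfl
  | cons c rest ih => simp [flipLoopA, flipB] at *; exact ih

theorem core_eq (p : List Char) :
    solutionCoreA p = (segLoopB p [] 0 []).reverse.foldl foldStepB [] := by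
  by_cases hp : p = []
  · subst hp; simp [solutionCoreA, segLoopB]
  · rw [solutionCoreA, dif_neg hp, segLoopB_eq_fz]
    have hb0 : balLoopA p 0 0 = (fz p 0).map (· + 0) := balLoopA_eq_fz p 0 0 (by omega)
    cases hfz : fz p 0 with
    | none =>
      have hbal : balancedA p = (p, [], PySem.List.pyGet? p 0 == some '(') := by
        unfold balancedA; rw [hb0, hfz]; rfl
      rw [hbal, List.nil_append, if_neg hp, foldB_cons]
      simp only [List.reverse_nil, List.foldl_nil, foldStepB]
      by_cases hc : PySem.List.pyGet? p 0 == some '('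
      · rw [if_pos hc, hc]
        simp [solutionCoreA]
      · rw [if_neg hc]
        simp only [Bool.not_eq_true] at hc
        rw [hc]
        simp [solutionCoreA, flipLoopA_eq_flipB]
    | some i =>
      have hbal : balancedA p =
          (PySem.List.slice p none (some ((i : Int) + 1)),
           PySem.List.slice p (some ((i : Int) + 1)) none,
           PySem.List.pyGet? p 0 == some '(') := by
        unfold balancedA; rw [hb0, hfz]; rfl
      have hi : i < p.length := fz_lt hfz
      have hcast : ((i : Int) + 1) = ((i + 1 : Nat) : Int) := by push_cast; ring
      have hu : PySem.List.slice p none (some ((i : Int) + 1)) = p.take (i + 1) := by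
        rw [hcast, PySem.List.slice_to_natCast]
      have hv : PySem.List.slice p (some ((i : Int) + 1)) none = p.drop (i + 1) := by
        rw [hcast, PySem.List.slice_from_natCast]
      rw [hbal, foldB_cons]
      have hIH : solutionCoreA (p.drop (i + 1)) =
          (segLoopB (p.drop (i + 1)) [] 0 []).reverse.foldl foldStepB [] := core_eq (p.drop (i + 1))
      simp only [hu, hv, List.nil_append]
      rw [foldStepB, head_take p (i + 1) (by omega) hp]
      by_cases hc : PySem.List.pyGet? p 0 == some '('
      · rw [if_pos hc, hc, if_pos rfl, hIH]
      · rw [if_neg hc]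
        simp only [Bool.not_eq_true] at hc
        rw [hc]
        simp [hIH, flipLoopA_eq_flipB]
termination_by p.length
decreasing_by simp; omega

-- ===== VERDICT (by name: the statement is the Claim_ definition above) =====
theorem solution_spec : Claim_equal_solution := by
  intro p _
  unfold Spec_solution solution solution_alt
  rw [core_eq]
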